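-- pv_equiv track=rewrite | github.com/TIES-Lab/RTL-CFG-Gen | Node_Branch_Selection.py | CFG_get_upper
-- ===== SOURCE A (Python) =====
-- def CFG_get_upper(lines: list[str], trgt: str, out_lst = None):
--     get_node = []
--     for iter_no, iter_line in enumerate(lines):
--         if iter_line[1].strip() == trgt.strip():
--             get_node = iter_line[0] if iter_line[2] == "A" else iter_line[0][:-1]
--             out_lst.append(iter_line)
--             break
--     if get_node != []:
--         for iter_no, iter_line in enumerate(lines):
--             if iter_line[0] == get_node:
--                 out_lst = CFG_get_upper(lines, iter_line[1], out_lst)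
--                 break
--         return out_lst
--     else:
--         return out_lst
-- ===== SOURCE B (Python) =====
-- def CFG_get_upper(lines: list[str], trgt: str, out_lst = None):
--     # Build first-wins indexes once, then follow the parent chain with a loop
--     # (no rescan of `lines` per level, no recursion).
--     by_target = {}
--     by_node = {}
--     for r in lines:
--         k = r[1].strip()
--         if k not in by_target:
--             by_target[k] = r
--         if r[0] not in by_node:
--             by_node[r[0]] = r
--     while True:
--         row = by_target.get(trgt.strip())
--         if row is None:
--             return out_lst
--         out_lst.append(row)
--         node = row[0] if row[2] == "A" else row[0][:-1]
--         parent = by_node.get(node)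
--         if parent is None:
--             return out_lst
--         trgt = parent[1]
-- ===== Notes on version B (the rewrite author's own statement) =====
-- stated objective: alternative
-- what changed: Replaces the tail recursion that rescans `lines` twice per chain level with two first-wins hash indexes (stripped column-1 -> row, column-0 -> row) built in one pass, followed by an iterative while-loop that walks the parent chain by O(1) lookups.
-- outside the precondition, e.g. on CFG_get_upper([['a', 't', 'B'], ['x']], 't', []): A returns [['a', 't', 'B']], B raises IndexError
import Mathlib
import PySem

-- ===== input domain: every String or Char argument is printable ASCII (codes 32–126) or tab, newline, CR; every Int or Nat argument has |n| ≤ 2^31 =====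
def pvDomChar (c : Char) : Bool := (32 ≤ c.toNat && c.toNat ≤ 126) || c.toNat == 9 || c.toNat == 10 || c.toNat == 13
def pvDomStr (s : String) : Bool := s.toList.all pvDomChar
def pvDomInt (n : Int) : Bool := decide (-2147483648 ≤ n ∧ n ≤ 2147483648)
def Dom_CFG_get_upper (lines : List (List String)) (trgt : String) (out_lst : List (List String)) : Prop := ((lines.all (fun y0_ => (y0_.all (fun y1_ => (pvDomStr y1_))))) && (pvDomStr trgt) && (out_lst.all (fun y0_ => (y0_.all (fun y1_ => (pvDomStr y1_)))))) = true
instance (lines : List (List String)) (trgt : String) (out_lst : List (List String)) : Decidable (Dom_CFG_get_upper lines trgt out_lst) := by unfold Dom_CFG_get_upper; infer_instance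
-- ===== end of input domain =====

-- B replaces A's per-level rescans+recursion by two first-wins indexes built once and an
-- iterative chain walk (objective: alternative).  Both Pythons mutate out_lst in place the
-- same way; the theorems are about the returned value.

-- ===== PORT A =====
-- Row indexing r.getD i "" is exact under Pre_ (every row read at column i has > i columns;
-- on shorter rows Python raises IndexError, excluded by Pre_).
-- first for-loop with break: first row whose stripped column 1 equals stripped trgt
def pvScanMatch (lines : List (List String)) (trgt : String) : Option (List String) :=
  match lines with
  | [] => none
  | r :: rest =>
      if PySem.Str.strip (r.getD 1 "") == PySem.Str.strip trgt then some r
      else pvScanMatch rest trgt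

-- second for-loop with break: first row whose column 0 equals get_node
def pvScanNode (lines : List (List String)) (node : String) : Option (List String) :=
  match lines with
  | [] => none
  | r :: rest => if r.getD 0 "" == node then some r else pvScanNode rest node

-- A's recursion; the fuel lines.length + 1 is a totality guard only: under Pre_ (chain dies
-- within lines.length + 1 steps) it is never exhausted, and on deeper chains Python's A
-- raises RecursionError (excluded by Pre_).
def pvRecA (lines : List (List String)) (fuel : Nat) (trgt : String)
    (out_lst : List (List String)) : List (List String) :=
  match fuel with
  | 0 => out_lst
  | f + 1 =>
    match pvScanMatch lines trgt with
    | none => out_lst                        -- get_node stayed [], else-branch: return out_lst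
    | some row =>
        let get_node := if row.getD 2 "" == "A" then row.getD 0 ""
                        else PySem.Str.slice (row.getD 0 "") none (some (-1))  -- iter_line[0][:-1]
        let out2 := out_lst ++ [row]         -- out_lst.append(iter_line)
        match pvScanNode lines get_node with
        | none => out2
        | some prow => pvRecA lines f (prow.getD 1 "") out2

def CFG_get_upper (lines : List (List String)) (trgt : String) (out_lst : List (List String)) : List (List String) :=
  pvRecA lines (lines.length + 1) trgt out_lst

-- ===== PORT B =====
-- one pass over lines building both first-wins dictionaries
def pvIndex (lines : List (List String)) :
    PySem.Dict String (List String) × PySem.Dict String (List String) :=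
  lines.foldl (fun p r =>
    (if p.1.contains (PySem.Str.strip (r.getD 1 "")) then p.1
     else p.1.insert (PySem.Str.strip (r.getD 1 "")) r,
     if p.2.contains (r.getD 0 "") then p.2 else p.2.insert (r.getD 0 "") r))
    (PySem.Dict.empty, PySem.Dict.empty)

-- the while-True loop threading trgt/out; same fuel-totality guard as A's port
def pvLoopB (bt bn : PySem.Dict String (List String)) (fuel : Nat) (trgt : String)
    (out : List (List String)) : List (List String) :=
  match fuel with
  | 0 => out
  | f + 1 =>
    match bt.get? (PySem.Str.strip trgt) with
    | none => out
    | some row =>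
        let out2 := out ++ [row]             -- out_lst.append(row)
        let node := if row.getD 2 "" == "A" then row.getD 0 ""
                    else PySem.Str.slice (row.getD 0 "") none (some (-1))      -- row[0][:-1]
        match bn.get? node with
        | none => out2
        | some prow => pvLoopB bt bn f (prow.getD 1 "") out2

def CFG_get_upper_alt (lines : List (List String)) (trgt : String) (out_lst : List (List String)) : List (List String) :=
  let idx := pvIndex lines
  pvLoopB idx.1 idx.2 (lines.length + 1) trgt out_lst

-- ===== PRECONDITION & SPEC =====
-- one step of the parent chain: the next target, or none if the chain stops here
def pvStep (lines : List (List String)) : Option String → Option String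
  | none => none
  | some t =>
    match lines.find? (fun r => PySem.Str.strip (r.getD 1 "") == PySem.Str.strip t) with
    | none => none
    | some row =>
        let node := if row.getD 2 "" == "A" then row.getD 0 ""
                    else PySem.Str.slice (row.getD 0 "") none (some (-1))
        match lines.find? (fun r => r.getD 0 "" == node) with
        | none => none
        | some prow => some (prow.getD 1 "")

-- true unless the chain target t? has a first-matching row with fewer than 3 columns
def pvRowOk (lines : List (List String)) (t? : Option String) : Bool :=
  match t? with
  | none => true
  | some t =>
    match lines.find? (fun r => PySem.Str.strip (r.getD 1 "") == PySem.Str.strip t) with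
    | none => true
    | some row => 3 ≤ row.length

-- Pre_ excludes exactly the inputs on which one of the two Pythons raises: (i) a row of
-- fewer than 2 columns (B's index pass reads columns 0 and 1 of every row; A reads column 1
-- of every row up to its first match: IndexError); (ii) a chain step whose first-matching
-- row has only 2 columns — both programs read its column 2 (IndexError); (iii) a parent
-- chain that never dies out — there A raises RecursionError and B's while-loop spins (after
-- the first step targets repeat within lines.length rows, so termination is exactly "the
-- chain from trgt dies within lines.length + 1 steps"; iterating the one-edge step map
-- pvStep is the closed form of conditions (ii) and (iii) on the chain).
def Pre_CFG_get_upper (lines : List (List String)) (trgt : String) (out_lst : List (List String)) : Prop :=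
  (∀ r ∈ lines, 2 ≤ r.length) ∧
  (∀ i ≤ lines.length, pvRowOk lines ((pvStep lines)^[i] (some trgt)) = true) ∧
  (pvStep lines)^[lines.length + 1] (some trgt) = none

instance (lines : List (List String)) (trgt : String) (out_lst : List (List String)) : Decidable (Pre_CFG_get_upper lines trgt out_lst) := by unfold Pre_CFG_get_upper; infer_instance

def pvWitness_CFG_get_upper : List (List String) × String × List (List String) :=
  ([["n1", "a", "A"], ["n2", "n1", "B"]], " b ", [["x", "y", "z"]])

def Spec_CFG_get_upper (lines : List (List String)) (trgt : String) (out_lst : List (List String)) (out : List (List String)) : Prop := out = CFG_get_upper_alt lines trgt out_lst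
instance (lines : List (List String)) (trgt : String) (out_lst : List (List String)) (out : List (List String)) : Decidable (Spec_CFG_get_upper lines trgt out_lst out) := by unfold Spec_CFG_get_upper; infer_instance

-- ===== CLAIM (what is proved, stated in full; the proofs are below) =====
def Claim_equal_CFG_get_upper : Prop := ∀ (lines : List (List String)) (trgt : String) (out_lst : List (List String)), Dom_CFG_get_upper lines trgt out_lst → Pre_CFG_get_upper lines trgt out_lst → Spec_CFG_get_upper lines trgt out_lst (CFG_get_upper lines trgt out_lst)

-- ===== LEMMAS AND PROOFS =====

lemma pvScanMatch_eq_find (lines : List (List String)) (trgt : String) :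
    pvScanMatch lines trgt
      = lines.find? (fun r => PySem.Str.strip (r.getD 1 "") == PySem.Str.strip trgt) := by
  induction lines with
  | nil => rfl
  | cons r rest ih =>
    by_cases h : PySem.Str.strip (r.getD 1 "") = PySem.Str.strip trgt <;>
      simp_all [pvScanMatch]

lemma pvScanNode_eq_find (lines : List (List String)) (node : String) :
    pvScanNode lines node = lines.find? (fun r => r.getD 0 "" == node) := by
  induction lines with
  | nil => rfl
  | cons r rest ih =>
    by_cases h : r.getD 0 "" = node <;> simp_all [pvScanNode]

-- a pair-valued fold with independent components is the pair of folds
lemma pvFoldl_pair {α β γ : Type} (l : List α) (g1 : β → α → β) (g2 : γ → α → γ)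
    (d1 : β) (d2 : γ) :
    l.foldl (fun p r => (g1 p.1 r, g2 p.2 r)) (d1, d2) = (l.foldl g1 d1, l.foldl g2 d2) := by
  induction l generalizing d1 d2 with
  | nil => rfl
  | cons r rest ih => simpa using ih (g1 d1 r) (g2 d2 r)

-- lookup in a first-wins index = first match in the list
lemma pvGet?_firstwins (f : List String → String) (l : List (List String))
    (d : PySem.Dict String (List String)) (k : String) :
    (l.foldl (fun d r => if d.contains (f r) then d else d.insert (f r) r) d).get? k
      = (d.get? k).or (l.find? (fun r => f r == k)) := by
  induction l generalizing d with
  | nil => cases h : d.get? k <;> simp [h]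
  | cons r rest ih =>
    simp only [List.foldl_cons, List.find?]
    rw [ih]
    by_cases hk : f r = k
    · subst hk
      by_cases hc : d.contains (f r) = true
      · rw [if_pos hc]
        rw [PySem.Dict.contains_eq_isSome_get?] at hc
        obtain ⟨v, hv⟩ := Option.isSome_iff_exists.mp hc
        simp [hv]
      · rw [if_neg hc]
        have hnone : d.get? (f r) = none :=
          (PySem.Dict.get?_eq_none_iff_contains _ _).mpr (by simpa using hc)
        simp [hnone]
    · have hb : (f r == k) = false := by simpa using hk
      simp only [hb]
      split
      · rfl
      · rw [PySem.Dict.get?_insert]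
        simp [Ne.symm hk]

lemma pvIndex_eq (lines : List (List String)) :
    pvIndex lines =
      (lines.foldl (fun d r => if d.contains (PySem.Str.strip (r.getD 1 "")) then d
                               else d.insert (PySem.Str.strip (r.getD 1 "")) r) PySem.Dict.empty,
       lines.foldl (fun d r => if d.contains (r.getD 0 "") then d
                               else d.insert (r.getD 0 "") r) PySem.Dict.empty) := by
  unfold pvIndex
  exact pvFoldl_pair lines
    (fun d r => if d.contains (PySem.Str.strip (r.getD 1 "")) then d
                else d.insert (PySem.Str.strip (r.getD 1 "")) r)
    (fun d r => if d.contains (r.getD 0 "") then d else d.insert (r.getD 0 "") r)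
    PySem.Dict.empty PySem.Dict.empty

lemma pvIndex_fst_get? (lines : List (List String)) (k : String) :
    (pvIndex lines).1.get? k
      = lines.find? (fun r => PySem.Str.strip (r.getD 1 "") == k) := by
  rw [pvIndex_eq]
  simpa using pvGet?_firstwins (fun r => PySem.Str.strip (r.getD 1 "")) lines PySem.Dict.empty k

lemma pvIndex_snd_get? (lines : List (List String)) (k : String) :
    (pvIndex lines).2.get? k = lines.find? (fun r => r.getD 0 "" == k) := by
  rw [pvIndex_eq]
  simpa using pvGet?_firstwins (fun r => r.getD 0 "") lines PySem.Dict.empty k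

lemma pvRecA_eq_loopB (lines : List (List String)) (fuel : Nat) :
    ∀ (trgt : String) (out : List (List String)),
      pvRecA lines fuel trgt out = pvLoopB (pvIndex lines).1 (pvIndex lines).2 fuel trgt out := by
  induction fuel with
  | zero => intro trgt out; rfl
  | succ f ih =>
    intro trgt out
    simp only [pvRecA, pvLoopB, pvScanMatch_eq_find, pvScanNode_eq_find,
      pvIndex_fst_get?, pvIndex_snd_get?]
    cases hm : lines.find? (fun r => PySem.Str.strip (r.getD 1 "") == PySem.Str.strip trgt) with
    | none => rfl
    | some row =>
      dsimp only
      cases hn : lines.find? (fun r =>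
          r.getD 0 "" == if row.getD 2 "" == "A" then row.getD 0 ""
                         else PySem.Str.slice (row.getD 0 "") none (some (-1))) with
      | none => rfl
      | some prow => exact ih _ _

-- ===== VERDICT (by name: the statement is the Claim_ definition above) =====
theorem CFG_get_upper_spec : Claim_equal_CFG_get_upper := by
  intro lines trgt out_lst _ _
  unfold Spec_CFG_get_upper CFG_get_upper CFG_get_upper_alt
  exact pvRecA_eq_loopB lines (lines.length + 1) trgt out_lst
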